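-- pv_equiv track=rewrite | github.com/petrzelk/pe-petrzelka | problems/p53.py | p53
-- ===== SOURCE A (Python) =====
-- def p53(rows: int = 100, cap: int = 1_000_000) -> int:
--   """The solution.
--   """
--   #using the definition of nCr, it is analagous to pascals triangle,
--   #where n is the row of the triangle and r is term number in that row.
--   n = 0
--   row = [1]
--   #result tracks the number of terms over a million.
--   result = [0]
--   #We only track the first half of the row, as it is symmetric.
--   #The length of this half is n//2+1. We will proceed row by row.
--   while n <= rows - 1:
--     #begin by advancing the row number.
--     n += 1
--     #first we need to know if we need to prepend the "double" value.
--     if n % 2 == 0 and not result[-1]: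
--       row = [row[0]] + row
--     #to match the row list we need to generate the new list.
--     for i in range(len(row) - 1):
--       row[i] = sum(row[i:i + 2])
--     #check to see if the list has a new term over one-million.
--     if row[0] > cap:
--       #remove the term over one-million
--       row = row[1:]
--       #if it is the first time, it might be a single, center number
--       if not (len(result) - 1) and not n % 2:
--         result += [1]
--       #otherwise this is a pair
--       else:
--         result += [2]
--       #check for an add any additional leading values greater than one-million
--       while row[0] > cap:
--         row = row[1:]
--         result[-1] += 2
--       #add on the number of values from the prior row
--       if result[-2]:
--         result[-1] += result[-2] + 1
--     #if values have been stored in the result then we need to move them up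
--     elif result[-1]:
--       result += [result[-1] + 1]
--   #return the total count
--   return (sum(result))
-- ===== SOURCE B (Python) =====
-- def p53(rows: int = 100, cap: int = 1_000_000) -> int:
--     # Two-pointer over the threshold column: k tracks the largest column r with
--     # C(n, r) <= cap (within the left half), c tracks C(n, k) incrementally.
--     total = 0
--     k = 0
--     c = 1                      # c = C(n, k)
--     exceeded = False           # has any entry ever exceeded cap?
--     for n in range(1, rows + 1):
--         if not exceeded and n % 2 == 0:
--             # before anything exceeds, follow the central column: k = n // 2
--             k += 1
--             c = c * n // k          # C(n, k) = C(n-1, k-1) * n / k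
--         else:
--             c = c * n // (n - k)    # C(n, k) = C(n-1, k) * n / (n - k)
--         if c > cap:
--             exceeded = True
--             while c > cap and k > 0:
--                 c = c * k // (n - k + 1)   # C(n, k-1) = C(n, k) * k / (n - k + 1)
--                 k -= 1
--         if exceeded:
--             total += n - 1 - 2 * k     # entries of row n exceeding cap (by symmetry)
--     return total
-- ===== Notes on version B (the rewrite author's own statement) =====
-- stated objective: faster
-- what changed: B replaces A's list bookkeeping (a reversed half-row of Pascal's triangle rebuilt by adjacent sums, prepends, slicing pops and a result list) by a two-pointer scan that keeps only the threshold column k and the single binomial value C(n,k), updated by exact multiply/divide recurrences and walked down while it exceeds cap.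
-- outside the precondition, e.g. on p53(10, 0): A raises IndexError, B returns 45
import Mathlib
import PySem

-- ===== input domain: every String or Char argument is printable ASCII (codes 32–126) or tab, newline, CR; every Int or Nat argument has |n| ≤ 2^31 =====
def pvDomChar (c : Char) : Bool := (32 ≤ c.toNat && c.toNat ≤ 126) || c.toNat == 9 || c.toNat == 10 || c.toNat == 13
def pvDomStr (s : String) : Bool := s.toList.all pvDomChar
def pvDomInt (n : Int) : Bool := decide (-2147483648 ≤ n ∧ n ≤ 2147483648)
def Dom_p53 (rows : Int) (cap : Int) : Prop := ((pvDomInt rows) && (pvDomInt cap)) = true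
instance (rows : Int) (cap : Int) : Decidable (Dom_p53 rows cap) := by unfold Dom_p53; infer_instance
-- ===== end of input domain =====

-- B replaces A's list-of-half-row bookkeeping by a two-pointer on the threshold column k
-- with the single binomial value C(n,k) maintained by exact multiply/divide (objective: alternative).

-- ===== PORT A =====
-- for i in range(len(row) - 1): row[i] = sum(row[i:i + 2])
def pyAdjUpd (row : List Int) : List Int :=
  (PySem.List.pyRange 0 ((row.length : Int) - 1) 1).foldl
    (fun r i => PySem.List.pySetD r i ((PySem.List.slice r (some i) (some (i + 2))).sum)) row

-- while row[0] > cap: row = row[1:]; result[-1] += 2   (last = current result[-1])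
def popA (cap : Int) : List Int → Int → List Int × Int
  | [], last => ([], last)
  | x :: xs, last => if cap < x then popA cap xs (last + 2) else (x :: xs, last)

def loopA (rows cap : Int) (n : Int) (row result : List Int) : Int :=
  if h : n ≤ rows - 1 then
    let n' := n + 1
    let row1 := if PySem.Int.mod n' 2 == 0 && PySem.List.pyGetD result (-1) 0 == 0
                then PySem.List.pyGetD row 0 0 :: row else row
    let row2 := pyAdjUpd row1
    if cap < PySem.List.pyGetD row2 0 0 then
      let row3 := PySem.List.slice row2 (some 1) none
      let result1 := if (result.length : Int) - 1 == 0 && PySem.Int.mod n' 2 == 0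
                     then result ++ [1] else result ++ [2]
      let (row4, last4) := popA cap row3 (PySem.List.pyGetD result1 (-1) 0)
      let result2 := PySem.List.pySetD result1 ((result1.length : Int) - 1) last4
      let prev := PySem.List.pyGetD result2 (-2) 0
      let result3 := if prev == 0 then result2
                     else PySem.List.pySetD result2 ((result2.length : Int) - 1)
                            (PySem.List.pyGetD result2 (-1) 0 + prev + 1)
      loopA rows cap n' row4 result3
    else
      let result' := if PySem.List.pyGetD result (-1) 0 == 0 then result
                     else result ++ [PySem.List.pyGetD result (-1) 0 + 1]
      loopA rows cap n' row2 result'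
  else result.sum
termination_by (rows - n).toNat
decreasing_by all_goals simp_all

def p53 (rows : Int) (cap : Int) : Int := loopA rows cap 0 [1] [0]

-- ===== PORT B =====
-- while c > cap and k > 0: c = c * k // (n - k + 1); k -= 1
def walkB (cap n : Int) (c k : Int) : Int × Int :=
  if h : cap < c ∧ 0 < k then
    walkB cap n (PySem.Int.floordiv (c * k) (n - k + 1)) (k - 1)
  else (c, k)
termination_by k.toNat
decreasing_by omega

def stepB (cap : Int) (st : Int × Int × Int × Bool) (n : Int) : Int × Int × Int × Bool :=
  let (total, k, c, exceeded) := st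
  let (k1, c1) := if !exceeded && PySem.Int.mod n 2 == 0
                  then (k + 1, PySem.Int.floordiv (c * n) (k + 1))
                  else (k, PySem.Int.floordiv (c * n) (n - k))
  if cap < c1 then
    let (c2, k2) := walkB cap n c1 k1
    (total + n - 1 - 2 * k2, k2, c2, true)
  else if exceeded then (total + n - 1 - 2 * k1, k1, c1, exceeded)
  else (total, k1, c1, exceeded)

def p53_alt (rows : Int) (cap : Int) : Int :=
  ((PySem.List.pyRange 1 (rows + 1) 1).foldl (stepB cap) (0, 0, 1, false)).1

-- ===== PRECONDITION & SPEC =====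
-- Pre_ excludes cap ≤ 0 with rows ≥ 1: there A's inner while pops the whole half-row and raises IndexError.
def Pre_p53 (rows : Int) (cap : Int) : Prop := 1 ≤ cap ∨ rows ≤ 0
instance (rows : Int) (cap : Int) : Decidable (Pre_p53 rows cap) := by unfold Pre_p53; infer_instance

def pvWitness_p53 : Int × Int := (10, 100)

def Spec_p53 (rows : Int) (cap : Int) (out : Int) : Prop := out = p53_alt rows cap
instance (rows : Int) (cap : Int) (out : Int) : Decidable (Spec_p53 rows cap out) := by unfold Spec_p53; infer_instance

-- ===== CLAIM (what is proved, stated in full; the proofs are below) =====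
def Claim_equal_p53 : Prop := ∀ (rows : Int) (cap : Int), Dom_p53 rows cap → Pre_p53 rows cap → Spec_p53 rows cap (p53 rows cap)

-- ===== LEMMAS AND PROOFS =====

-- The reversed half-row [C(n,k), C(n,k-1), ..., C(n,0)] that A keeps as `row`.
def revHalf (n k : ℕ) : List Int :=
  ((List.range (k+1)).reverse).map (fun r => ((n.choose r : ℕ) : Int))

theorem revHalf_zero (n : ℕ) : revHalf n 0 = [1] := by simp [revHalf]

theorem revHalf_succ (n k : ℕ) :
    revHalf n (k+1) = ((n.choose (k+1) : ℕ) : Int) :: revHalf n k := by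
  simp [revHalf, List.range_succ]

theorem revHalf_shape (n k : ℕ) : ∃ t, revHalf n k = ((n.choose k : ℕ) : Int) :: t := by
  cases k with
  | zero => exact ⟨[], by simp [revHalf_zero]⟩
  | succ k => exact ⟨revHalf n k, revHalf_succ n k⟩

-- adjacent-sum list: what A's in-place `row[i] = sum(row[i:i+2])` loop computes
def adjSum : List Int → List Int
  | [] => []
  | [a] => [a]
  | a :: b :: t => (a + b) :: adjSum (b :: t)

theorem fd_exact (a b q : Int) (hb : 0 < b) (h : a = q * b) :
    PySem.Int.floordiv a b = q := by
  rw [PySem.Int.floordiv_eq_ediv_of_pos hb, h, Int.mul_ediv_cancel _ (by omega)]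

theorem consFold (n : ℕ) (x : Int) (l : List Int) :
    (List.range n).foldl (fun r k => r.set (k+1) (((r.drop (k+1)).take 2).sum)) (x :: l)
      = x :: (List.range n).foldl (fun r k => r.set k (((r.drop k).take 2).sum)) l := by
  induction n with
  | zero => simp
  | succ n ih => rw [List.range_succ, List.foldl_append, List.foldl_append, ih]; simp

theorem foldSet : ∀ l : List Int,
    (List.range (l.length - 1)).foldl (fun r k => r.set k (((r.drop k).take 2).sum)) l = adjSum l := by
  intro l
  induction l with
  | nil => simp [adjSum]
  | cons a t ih =>
    cases t with
    | nil => simp [adjSum]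
    | cons b t' =>
      have hlen : (a :: b :: t').length - 1 = ((b :: t').length - 1) + 1 := by simp
      rw [hlen, List.range_succ_eq_map, List.foldl_cons]
      have h0 : (a :: b :: t').set 0 ((((a :: b :: t').drop 0).take 2).sum) = (a + b) :: b :: t' := by
        simp [adjSum]
      rw [h0, List.foldl_map]
      have : ∀ (r : List Int) (k : ℕ), r.set (Nat.succ k) (((r.drop (Nat.succ k)).take 2).sum)
          = r.set (k+1) (((r.drop (k+1)).take 2).sum) := fun _ _ => rfl
      rw [show (fun (r : List Int) (k : ℕ) => r.set k.succ (((r.drop k.succ).take 2).sum))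
            = (fun (r : List Int) (k : ℕ) => r.set (k+1) (((r.drop (k+1)).take 2).sum)) from rfl,
          consFold, ih]
      rfl

theorem pyAdjUpd_eq (row : List Int) : pyAdjUpd row = adjSum row := by
  unfold pyAdjUpd
  rw [PySem.List.pyRange_one, List.foldl_map]
  have hlen : (((row.length : Int) - 1) - 0).toNat = row.length - 1 := by omega
  rw [hlen, ← foldSet row]
  apply PySem.List.foldl_congr_mem
  intro acc k _
  simp only [zero_add]
  rw [show ((k : Int) + 2) = ((k : ℕ) : Int) + ((2 : ℕ) : Int) by push_cast; ring,
      PySem.List.slice_natCast_add, PySem.List.pySetD_natCast]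

theorem adjSum_revHalf (n : ℕ) : ∀ k, adjSum (revHalf n k) = revHalf (n+1) k := by
  intro k
  induction k with
  | zero => simp [revHalf_zero, adjSum]
  | succ k ih =>
    obtain ⟨t, ht⟩ := revHalf_shape n k
    rw [revHalf_succ, ht, adjSum, ← ht, ih, revHalf_succ]
    congr 1
    have := Nat.choose_succ_succ n k
    push_cast [this]
    ring

theorem adjSum_prepend (k : ℕ) :
    adjSum ((((2*k+1).choose k : ℕ) : Int) :: revHalf (2*k+1) k) = revHalf (2*k+2) (k+1) := by
  obtain ⟨t, ht⟩ := revHalf_shape (2*k+1) k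
  rw [ht, adjSum, ← ht, adjSum_revHalf, revHalf_succ]
  have hsym : (2*k+1).choose (k+1) = (2*k+1).choose k := by
    rw [show k + 1 = 2*k+1 - k by omega, Nat.choose_symm (by omega : k ≤ 2*k+1)]
  have hpas := Nat.choose_succ_succ (2*k+1) k
  congr 1
  rw [show 2*k+2 = (2*k+1)+1 from rfl]
  push_cast [hpas, hsym]
  ring

theorem id_even (n k : ℕ) :
    ((n.choose k : ℕ) : Int) * ((n : Int) + 1) = (((n+1).choose (k+1) : ℕ) : Int) * ((k : Int) + 1) := by
  have h := Nat.add_one_mul_choose_eq n k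
  have : (((n+1) * n.choose k : ℕ) : Int) = (((n+1).choose (k+1) * (k+1) : ℕ) : Int) := by
    exact_mod_cast congrArg (fun z : ℕ => (z : Int)) h
  push_cast at this
  linarith

theorem id_same (n k : ℕ) (h : k ≤ n) :
    ((n.choose k : ℕ) : Int) * ((n : Int) + 1) = (((n+1).choose k : ℕ) : Int) * (((n : Int) + 1) - (k : Int)) := by
  have h1 := Nat.add_one_mul_choose_eq n k
  have h2 := Nat.choose_succ_right_eq (n+1) k
  have h3 : (n+1) * n.choose k = (n+1).choose k * (n + 1 - k) := by omega
  have h4 : (((n+1) * n.choose k : ℕ) : Int) = (((n+1).choose k * (n + 1 - k) : ℕ) : Int) := by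
    exact_mod_cast congrArg (fun z : ℕ => (z : Int)) h3
  push_cast [Nat.cast_sub (by omega : k ≤ n + 1)] at h4
  linarith

theorem id_down (m k : ℕ) (h : k + 1 ≤ m) :
    ((m.choose (k+1) : ℕ) : Int) * ((k : Int) + 1)
      = ((m.choose k : ℕ) : Int) * ((m : Int) - ((k : Int) + 1) + 1) := by
  have h2 := Nat.choose_succ_right_eq m k
  have h4 : ((m.choose (k+1) * (k+1) : ℕ) : Int) = ((m.choose k * (m - k) : ℕ) : Int) := by
    exact_mod_cast congrArg (fun z : ℕ => (z : Int)) h2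
  push_cast [Nat.cast_sub (by omega : k ≤ m)] at h4
  linarith

theorem walk_pop (cap : Int) (hcap : 1 ≤ cap) (mm : ℕ) :
    ∀ kk : ℕ, kk ≤ mm →
    ∃ KK : ℕ, KK ≤ kk ∧ ((mm.choose KK : ℕ) : Int) ≤ cap ∧
      walkB cap (mm : Int) ((mm.choose kk : ℕ) : Int) (kk : Int)
        = (((mm.choose KK : ℕ) : Int), (KK : Int)) ∧
      ∀ acc : Int, popA cap (revHalf mm kk) acc = (revHalf mm KK, acc + 2 * ((kk : Int) - (KK : Int))) := by
  intro kk
  induction kk with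
  | zero =>
    intro _
    refine ⟨0, le_refl 0, by simpa using hcap, ?_, ?_⟩
    · rw [walkB, dif_neg (by simp)]
    · intro acc
      rw [revHalf_zero]
      simp [popA, not_lt.2 hcap]
  | succ kk ih =>
    intro hle
    by_cases hc : cap < ((mm.choose (kk+1) : ℕ) : Int)
    · obtain ⟨KK, h1, h2, h3, h4⟩ := ih (by omega)
      refine ⟨KK, by omega, h2, ?_, ?_⟩
      · rw [walkB, dif_pos ⟨hc, by push_cast; omega⟩]
        have hk1 : (((kk+1 : ℕ) : Int)) - 1 = ((kk : ℕ) : Int) := by push_cast; ring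
        have hfd : PySem.Int.floordiv (((mm.choose (kk+1) : ℕ) : Int) * ((kk+1 : ℕ) : Int))
            ((mm : Int) - ((kk+1 : ℕ) : Int) + 1) = ((mm.choose kk : ℕ) : Int) := by
          apply fd_exact _ _ _ (by push_cast; omega)
          push_cast
          push_cast at *
          linarith [id_down mm kk hle]
        rw [hk1, hfd, h3]
      · intro acc
        rw [revHalf_succ, popA, if_pos hc, h4 (acc + 2)]
        have : acc + 2 + 2 * ((kk : Int) - (KK : Int)) = acc + 2 * (((kk+1 : ℕ) : Int) - (KK : Int)) := by
          push_cast; ring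
        rw [this]
    · refine ⟨kk+1, le_refl _, not_lt.1 hc, ?_, ?_⟩
      · rw [walkB, dif_neg (by intro h; exact hc h.1)]
      · intro acc
        rw [revHalf_succ, popA, if_neg hc, ← revHalf_succ]
        simp

theorem revHalf_head (n k : ℕ) : PySem.List.pyGetD (revHalf n k) 0 0 = ((n.choose k : ℕ) : Int) := by
  obtain ⟨t, ht⟩ := revHalf_shape n k
  rw [ht, PySem.List.pyGetD_zero_cons]

theorem pySetD_append_last (xs : List Int) (x v : Int) :
    PySem.List.pySetD (xs ++ [x]) (((xs ++ [x]).length : Int) - 1) v = xs ++ [v] := by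
  have h : (((xs ++ [x]).length : Int) - 1) = ((xs.length : ℕ) : Int) := by simp
  rw [h, PySem.List.pySetD_natCast, List.set_append_right _ _ (le_refl _)]
  simp

theorem pyGetD_append2_neg2 (xs : List Int) (a b : Int) :
    PySem.List.pyGetD ((xs ++ [a]) ++ [b]) (-2) 0 = a := by
  rw [PySem.List.pyGetD_neg_ofNat _ 2 0 (by omega) (by simp)]
  have hi : (xs ++ [a] ++ [b]).length - 2 = xs.length := by simp
  simp only [hi]
  rw [List.getElem_append_left (by simp), List.getElem_append_right (le_refl _)]
  simp

theorem main_lemma (cap : Int) (hcap : 1 ≤ cap) (rows : Int) :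
    ∀ (fuel : ℕ) (nn kk : ℕ) (result : List Int) (total : Int) (exceeded : Bool),
    (rows - (nn : Int)).toNat = fuel →
    (exceeded = false → kk = nn / 2 ∧ result = [0] ∧ total = 0) →
    (exceeded = true → 2 * kk + 2 ≤ nn ∧
       ∃ res0 : List Int, res0 ≠ [] ∧ result = res0 ++ [(nn : Int) - 1 - 2 * (kk : Int)] ∧
         result.sum = total) →
    loopA rows cap (nn : Int) (revHalf nn kk) result
      = ((PySem.List.pyRange ((nn : Int) + 1) (rows + 1) 1).foldl (stepB cap)
          (total, (kk : Int), ((nn.choose kk : ℕ) : Int), exceeded)).1 := by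
  intro fuel
  induction fuel with
  | zero =>
    intro nn kk result total exceeded hfuel hF hT
    rw [loopA, dif_neg (by omega), PySem.List.pyRange_one_eq_nil (by omega)]
    cases exceeded with
    | false => obtain ⟨_, hres, htot⟩ := hF rfl; subst hres htot; simp
    | true => obtain ⟨_, res0, _, _, hsum⟩ := hT rfl; simpa using hsum
  | succ fuel ih =>
    intro nn kk result total exceeded hfuel hF hT
    have hcond : (nn : Int) ≤ rows - 1 := by omega
    rw [loopA, dif_pos hcond, PySem.List.pyRange_one_cons (by omega : (nn:Int)+1 < rows+1),
        List.foldl_cons]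
    have hmodeq : PySem.Int.mod ((nn:Int)+1) 2 = (((nn+1) % 2 : ℕ) : Int) := by
      rw [show ((nn:Int)+1) = (((nn+1:ℕ)):Int) by push_cast; ring]
      exact_mod_cast PySem.Int.mod_natCast (nn+1) 2
    have hcast1 : ((nn : Int) + 1) = (((nn+1 : ℕ)) : Int) := by push_cast; ring
    cases exceeded with
    | false =>
      obtain ⟨hkk, hres, htot⟩ := hF rfl
      subst hres htot
      -- new top column index after this row
      by_cases hpar : (nn+1) % 2 = 0
      case pos =>
        have hodd : nn = 2*kk + 1 := by omega
        have hbool : (PySem.Int.mod ((nn:Int)+1) 2 == 0 &&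
            PySem.List.pyGetD ([0] : List Int) (-1) 0 == 0) = true := by
          simp
          exact ⟨by omega, by decide⟩
        have hrow2 : pyAdjUpd (PySem.List.pyGetD (revHalf nn kk) 0 0 :: revHalf nn kk)
            = revHalf (nn+1) (kk+1) := by
          rw [revHalf_head, pyAdjUpd_eq, hodd, adjSum_prepend]
        have hc1 : PySem.Int.floordiv (((nn.choose kk : ℕ) : Int) * ((nn:Int)+1)) ((kk:Int)+1)
            = (((nn+1).choose (kk+1) : ℕ) : Int) :=
          fd_exact _ _ _ (by omega) (id_even nn kk)
        simp only [hbool, if_true, hrow2]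
        have hbool2 : ((((([0] : List Int)).length : Int) - 1 == 0 &&
            PySem.Int.mod ((nn:Int)+1) 2 == 0) = true) := by
          simp
          omega
        have hm1 : PySem.List.pyGetD (([0] : List Int) ++ [1]) (-1) 0 = 1 :=
          PySem.List.pyGetD_neg_one_append_singleton _ _ _
        rw [revHalf_head]
        simp only [hbool2, if_true, hm1]
        by_cases hc : cap < (((nn+1).choose (kk+1) : ℕ) : Int)
        ·
          rw [if_pos hc]
          have htail : PySem.List.slice (revHalf (nn+1) (kk+1)) (some 1) none = revHalf (nn+1) kk := by
            rw [PySem.List.slice_from_one, revHalf_succ]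
            rfl
          obtain ⟨KK, hKle, hKcap, hw, hp⟩ := walk_pop cap hcap (nn+1) kk (by omega)
          rw [htail, hp 1]
          have h02 : ∀ v : Int, PySem.List.pyGetD (([0] : List Int) ++ [v]) (-2) 0 = 0 := fun v => by
            have := pyGetD_append2_neg2 [] 0 v
            simpa using this
          rw [pySetD_append_last]
          simp only [h02]
          rw [if_pos (show ((0:Int) == 0) = true by decide)]
          have hm2 : (PySem.Int.mod ((nn:Int)+1) 2 == 0) = true := by rw [hmodeq, hpar]; decide
          have hstepB : stepB cap (0, (kk:Int), ((nn.choose kk : ℕ) : Int), false) ((nn:Int) + 1)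
              = (0 + ((nn:Int) + 1) - 1 - 2*(KK:Int), (KK:Int), (((nn+1).choose KK : ℕ) : Int), true) := by
            simp only [stepB, Bool.not_false, Bool.true_and, hm2, if_true, hc1]
            rw [if_pos hc, walkB, dif_pos ⟨hc, by omega⟩]
            have hfd2 : PySem.Int.floordiv ((((nn+1).choose (kk+1) : ℕ) : Int) * ((kk:Int)+1))
                (((nn:Int)+1) - ((kk:Int)+1) + 1) = (((nn+1).choose kk : ℕ) : Int) := by
              apply fd_exact _ _ _ (by omega)
              have := id_down (nn+1) kk (by omega)
              push_cast at this ⊢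
              linarith
            rw [show ((kk:Int)+1) - 1 = (kk:Int) by ring, hfd2, hcast1, hw]
          rw [hstepB]
          have hlast4 : (1:Int) + 2*((kk:Int) - (KK:Int)) = (((nn+1 : ℕ)) : Int) - 1 - 2*(KK:Int) := by
            push_cast
            omega
          rw [hcast1]
          exact ih (nn+1) KK ([0] ++ [1 + 2*((kk:Int) - (KK:Int))])
            (0 + (((nn+1:ℕ)):Int) - 1 - 2*(KK:Int)) true (by omega) (by simp)
            (fun _ => ⟨by omega, [0], by simp, by rw [hlast4], by simp; omega⟩)
        · rw [if_neg hc, if_pos (show (PySem.List.pyGetD ([0] : List Int) (-1) 0 == 0) = true by decide)]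
          have hm2 : (PySem.Int.mod ((nn:Int)+1) 2 == 0) = true := by rw [hmodeq, hpar]; decide
          have hstepB : stepB cap (0, (kk:Int), ((nn.choose kk : ℕ) : Int), false) ((nn:Int) + 1)
              = (0, (kk:Int)+1, (((nn+1).choose (kk+1) : ℕ) : Int), false) := by
            simp only [stepB, Bool.not_false, Bool.true_and, hm2, if_true, hc1]
            rw [if_neg hc]
            simp
          rw [hstepB, hcast1, show ((kk:Int)+1) = (((kk+1:ℕ)):Int) by push_cast; ring]
          exact ih (nn+1) (kk+1) [0] 0 false (by omega)
            (fun _ => ⟨by omega, rfl, rfl⟩) (by simp)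
      case neg =>
        have heven : nn = 2*kk := by omega
        have hm2f : (PySem.Int.mod ((nn:Int)+1) 2 == 0) = false := by
          rw [hmodeq]
          simp
          omega
        have hbool : (PySem.Int.mod ((nn:Int)+1) 2 == 0 &&
            PySem.List.pyGetD ([0] : List Int) (-1) 0 == 0) = false := by
          rw [hm2f, Bool.false_and]
        have hrow2 : pyAdjUpd (revHalf nn kk) = revHalf (nn+1) kk := by
          rw [pyAdjUpd_eq, adjSum_revHalf]
        have hc1 : PySem.Int.floordiv (((nn.choose kk : ℕ) : Int) * ((nn:Int)+1)) (((nn:Int)+1) - (kk:Int))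
            = (((nn+1).choose kk : ℕ) : Int) :=
          fd_exact _ _ _ (by omega) (id_same nn kk (by omega))
        simp only [hbool, Bool.false_eq_true, if_false, hrow2]
        rw [revHalf_head]
        by_cases hc : cap < (((nn+1).choose kk : ℕ) : Int)
        · rw [if_pos hc]
          have hkne : kk ≠ 0 := by
            rintro rfl
            simp [Nat.choose_zero_right] at hc
            omega
          obtain ⟨kk', rfl⟩ : ∃ kk', kk = kk'+1 := ⟨kk-1, by omega⟩
          have htail : PySem.List.slice (revHalf (nn+1) (kk'+1)) (some 1) none = revHalf (nn+1) kk' := by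
            rw [PySem.List.slice_from_one, revHalf_succ]
            rfl
          have hbool2 : ((((([0] : List Int)).length : Int) - 1 == 0 &&
              PySem.Int.mod ((nn:Int)+1) 2 == 0) = false) := by
            rw [hm2f, Bool.and_false]
          have hm1 : PySem.List.pyGetD (([0] : List Int) ++ [2]) (-1) 0 = 2 :=
            PySem.List.pyGetD_neg_one_append_singleton _ _ _
          simp only [hbool2, Bool.false_eq_true, if_false, hm1]
          obtain ⟨KK, hKle, hKcap, hw, hp⟩ := walk_pop cap hcap (nn+1) kk' (by omega)
          rw [htail, hp 2]
          have h02 : ∀ v : Int, PySem.List.pyGetD (([0] : List Int) ++ [v]) (-2) 0 = 0 := fun v => by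
            have := pyGetD_append2_neg2 [] 0 v
            simpa using this
          rw [pySetD_append_last]
          simp only [h02]
          rw [if_pos (show ((0:Int) == 0) = true by decide)]
          have hstepB : stepB cap (0, ((kk'+1 : ℕ):Int), ((nn.choose (kk'+1) : ℕ) : Int), false) ((nn:Int) + 1)
              = (0 + ((nn:Int) + 1) - 1 - 2*(KK:Int), (KK:Int), (((nn+1).choose KK : ℕ) : Int), true) := by
            simp only [stepB, Bool.not_false, Bool.true_and, hm2f, Bool.false_eq_true, if_false, hc1]
            rw [if_pos hc, walkB, dif_pos ⟨hc, by push_cast; omega⟩]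
            have hfd2 : PySem.Int.floordiv ((((nn+1).choose (kk'+1) : ℕ) : Int) * (((kk'+1:ℕ)):Int))
                (((nn:Int)+1) - (((kk'+1:ℕ)):Int) + 1) = (((nn+1).choose kk' : ℕ) : Int) := by
              apply fd_exact _ _ _ (by push_cast; omega)
              have := id_down (nn+1) kk' (by omega)
              push_cast at this ⊢
              linarith
            rw [show ((((kk'+1:ℕ)):Int)) - 1 = (kk':Int) by push_cast; ring, hfd2, hcast1, hw]
          rw [hstepB, hcast1]
          have hlast4 : (2:Int) + 2*((kk':Int) - (KK:Int)) = (((nn+1:ℕ)):Int) - 1 - 2*(KK:Int) := by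
            push_cast
            omega
          exact ih (nn+1) KK ([0] ++ [2 + 2*((kk':Int) - (KK:Int))])
            (0 + (((nn+1:ℕ)):Int) - 1 - 2*(KK:Int)) true (by omega) (by simp)
            (fun _ => ⟨by omega, [0], by simp, by rw [hlast4], by simp; omega⟩)
        · rw [if_neg hc, if_pos (show (PySem.List.pyGetD ([0] : List Int) (-1) 0 == 0) = true by decide)]
          have hstepB : stepB cap (0, (kk:Int), ((nn.choose kk : ℕ) : Int), false) ((nn:Int) + 1)
              = (0, (kk:Int), (((nn+1).choose kk : ℕ) : Int), false) := by
            simp only [stepB, Bool.not_false, Bool.true_and, hm2f, Bool.false_eq_true, if_false, hc1]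
            rw [if_neg hc]
          rw [hstepB, hcast1]
          exact ih (nn+1) kk [0] 0 false (by omega) (fun _ => ⟨by omega, rfl, rfl⟩) (by simp)
    | true =>
      obtain ⟨hb, res0, hresne, hres, hsum⟩ := hT rfl
      subst hres
      have hr0pos : 0 < res0.length := List.length_pos_iff.2 hresne
      have hlast : PySem.List.pyGetD (res0 ++ [(nn:Int) - 1 - 2*(kk:Int)]) (-1) 0
          = (nn:Int) - 1 - 2*(kk:Int) := PySem.List.pyGetD_neg_one_append_singleton _ _ _
      have hlastne : (PySem.List.pyGetD (res0 ++ [(nn:Int) - 1 - 2*(kk:Int)]) (-1) 0 == 0) = false := by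
        rw [hlast]
        simp only [beq_eq_false_iff_ne, ne_eq]
        omega
      have hbool : (PySem.Int.mod ((nn:Int)+1) 2 == 0 &&
          PySem.List.pyGetD (res0 ++ [(nn:Int) - 1 - 2*(kk:Int)]) (-1) 0 == 0) = false := by
        rw [hlastne, Bool.and_false]
      have hrow2 : pyAdjUpd (revHalf nn kk) = revHalf (nn+1) kk := by
        rw [pyAdjUpd_eq, adjSum_revHalf]
      have hc1 : PySem.Int.floordiv (((nn.choose kk : ℕ) : Int) * ((nn:Int)+1)) (((nn:Int)+1) - (kk:Int))
          = (((nn+1).choose kk : ℕ) : Int) :=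
        fd_exact _ _ _ (by omega) (id_same nn kk (by omega))
      simp only [hbool, Bool.false_eq_true, if_false, hrow2]
      rw [revHalf_head]
      by_cases hc : cap < (((nn+1).choose kk : ℕ) : Int)
      · rw [if_pos hc]
        have hkne : kk ≠ 0 := by
          rintro rfl
          simp [Nat.choose_zero_right] at hc
          omega
        obtain ⟨kk', rfl⟩ : ∃ kk', kk = kk'+1 := ⟨kk-1, by omega⟩
        have htail : PySem.List.slice (revHalf (nn+1) (kk'+1)) (some 1) none = revHalf (nn+1) kk' := by
          rw [PySem.List.slice_from_one, revHalf_succ]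
          rfl
        have hbool2 : ((((res0 ++ [(nn:Int) - 1 - 2*((kk'+1:ℕ):Int)]).length : Int) - 1 == 0 &&
            PySem.Int.mod ((nn:Int)+1) 2 == 0) = false) := by
          have h1 : ((((res0 ++ [(nn:Int) - 1 - 2*((kk'+1:ℕ):Int)]).length : Int) - 1 == 0)) = false := by
            simp only [beq_eq_false_iff_ne, ne_eq, List.length_append, List.length_cons,
              List.length_nil]
            push_cast
            omega
          rw [h1, Bool.false_and]
        have hm1 : PySem.List.pyGetD ((res0 ++ [(nn:Int) - 1 - 2*((kk'+1:ℕ):Int)]) ++ [2]) (-1) 0 = 2 :=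
          PySem.List.pyGetD_neg_one_append_singleton _ _ _
        simp only [hbool2, Bool.false_eq_true, if_false, hm1]
        obtain ⟨KK, hKle, hKcap, hw, hp⟩ := walk_pop cap hcap (nn+1) kk' (by omega)
        rw [htail, hp 2, pySetD_append_last]
        have hprev : PySem.List.pyGetD ((res0 ++ [(nn:Int) - 1 - 2*((kk'+1:ℕ):Int)]) ++
            [2 + 2 * ((kk':Int) - (KK:Int))]) (-2) 0 = (nn:Int) - 1 - 2*((kk'+1:ℕ):Int) :=
          pyGetD_append2_neg2 _ _ _
        simp only [hprev]
        rw [if_neg (by simp only [beq_iff_eq]; push_cast; omega),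
            PySem.List.pyGetD_neg_one_append_singleton, pySetD_append_last]
        have hstepB : stepB cap ((res0 ++ [(nn:Int) - 1 - 2*((kk'+1:ℕ):Int)]).sum,
            (((kk'+1:ℕ)):Int), ((nn.choose (kk'+1) : ℕ) : Int), true) ((nn:Int) + 1)
            = ((res0 ++ [(nn:Int) - 1 - 2*((kk'+1:ℕ):Int)]).sum + ((nn:Int) + 1) - 1 - 2*(KK:Int),
               (KK:Int), (((nn+1).choose KK : ℕ) : Int), true) := by
          simp only [stepB, Bool.not_true, Bool.false_and, Bool.false_eq_true, if_false, hc1]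
          rw [if_pos hc, walkB, dif_pos ⟨hc, by push_cast; omega⟩]
          have hfd2 : PySem.Int.floordiv ((((nn+1).choose (kk'+1) : ℕ) : Int) * (((kk'+1:ℕ)):Int))
              (((nn:Int)+1) - (((kk'+1:ℕ)):Int) + 1) = (((nn+1).choose kk' : ℕ) : Int) := by
            apply fd_exact _ _ _ (by push_cast; omega)
            have := id_down (nn+1) kk' (by omega)
            push_cast at this ⊢
            linarith
          rw [show ((((kk'+1:ℕ)):Int)) - 1 = (kk':Int) by push_cast; ring, hfd2, hcast1, hw]
        rw [hsum] at hstepB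
        rw [hstepB, hcast1]
        have hx : (2:Int) + 2 * ((kk':Int) - (KK:Int)) + ((nn:Int) - 1 - 2*((kk'+1:ℕ):Int)) + 1
            = (((nn+1:ℕ)):Int) - 1 - 2*(KK:Int) := by
          push_cast
          ring
        rw [hx]
        exact ih (nn+1) KK ((res0 ++ [(nn:Int) - 1 - 2*((kk'+1:ℕ):Int)]) ++
            [(((nn+1:ℕ)):Int) - 1 - 2*(KK:Int)]) (total + (((nn+1:ℕ)):Int) - 1 - 2*(KK:Int)) true
          (by omega) (by simp)
          (fun _ => ⟨by omega, res0 ++ [(nn:Int) - 1 - 2*((kk'+1:ℕ):Int)], by simp, rfl,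
            by rw [List.sum_append, hsum]; simp; ring⟩)
      · rw [if_neg hc]
        simp only [hlast]
        rw [if_neg (show ¬((((nn:Int) - 1 - 2*(kk:Int)) == 0) = true) by
          simp only [beq_iff_eq]
          omega)]
        have hstepB : stepB cap ((res0 ++ [(nn:Int) - 1 - 2*(kk:Int)]).sum,
            ((kk:Int)), ((nn.choose kk : ℕ) : Int), true) ((nn:Int) + 1)
            = ((res0 ++ [(nn:Int) - 1 - 2*(kk:Int)]).sum + ((nn:Int) + 1) - 1 - 2*(kk:Int),
               (kk:Int), (((nn+1).choose kk : ℕ) : Int), true) := by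
          simp only [stepB, Bool.not_true, Bool.false_and, Bool.false_eq_true, if_false, hc1]
          rw [if_neg hc]
          simp
        rw [hsum] at hstepB
        rw [hstepB, hcast1]
        have hx : ((nn:Int) - 1 - 2*(kk:Int)) + 1 = (((nn+1:ℕ)):Int) - 1 - 2*(kk:Int) := by
          push_cast
          ring
        rw [hx]
        exact ih (nn+1) kk ((res0 ++ [(nn:Int) - 1 - 2*(kk:Int)]) ++
            [(((nn+1:ℕ)):Int) - 1 - 2*(kk:Int)]) (total + (((nn+1:ℕ)):Int) - 1 - 2*(kk:Int)) true
          (by omega) (by simp)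
          (fun _ => ⟨by omega, res0 ++ [(nn:Int) - 1 - 2*(kk:Int)], by simp, rfl,
            by rw [List.sum_append, hsum]; simp; ring⟩)

-- ===== VERDICT (by name: the statement is the Claim_ definition above) =====
theorem p53_spec : Claim_equal_p53 := by
  intro rows cap _hdom hpre
  unfold Spec_p53 p53 p53_alt
  by_cases hr : rows ≤ 0
  · rw [loopA, dif_neg (by omega : ¬ (0 : Int) ≤ rows - 1),
       PySem.List.pyRange_one_eq_nil (by omega)]
    simp
  · have hcap : 1 ≤ cap := by rcases hpre with h | h; exact h; omega
    have := main_lemma cap hcap rows (rows - 0).toNat 0 0 [0] 0 false (by simp)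
      (fun _ => ⟨rfl, rfl, rfl⟩) (fun h => by simp at h)
    rw [revHalf_zero] at this
    simpa using this
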